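-- pv_equiv track=rewrite | github.com/s24740-pj/MHE | project.py | znajdz_grupy
-- ===== SOURCE A (Python) =====
-- def znajdz_grupy(linia):
--     grupy = []
--     licznik = 0
--     for pole in linia:
--         if pole == 1:
--             licznik += 1
--         elif licznik > 0:
--             grupy.append(licznik)
--             licznik = 0
--     if licznik > 0:
--         grupy.append(licznik)
--     return grupy
-- ===== SOURCE B (Python) =====
-- from itertools import groupby
--
-- def znajdz_grupy(linia):
--     return [sum(1 for _ in g) for k, g in groupby(linia, key=lambda pole: pole == 1) if k]
-- ===== Notes on version B (the rewrite author's own statement) =====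
-- stated objective: idiomatic
-- what changed: Replaces the manual accumulator loop with its trailing-flush branch by a group-wise traversal: itertools.groupby partitions the list into maximal runs keyed on (pole == 1) and a comprehension keeps the lengths of the truthy runs.
import Mathlib
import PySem

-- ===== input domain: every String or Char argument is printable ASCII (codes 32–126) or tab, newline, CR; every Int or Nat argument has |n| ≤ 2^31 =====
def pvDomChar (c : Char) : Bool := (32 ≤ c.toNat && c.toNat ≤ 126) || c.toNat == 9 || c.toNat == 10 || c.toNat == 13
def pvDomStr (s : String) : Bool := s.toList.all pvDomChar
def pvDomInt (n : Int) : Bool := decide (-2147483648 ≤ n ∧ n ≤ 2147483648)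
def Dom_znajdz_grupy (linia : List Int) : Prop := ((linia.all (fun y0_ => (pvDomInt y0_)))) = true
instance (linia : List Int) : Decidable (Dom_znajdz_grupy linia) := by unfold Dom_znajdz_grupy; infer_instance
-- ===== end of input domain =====

-- B groups the list with itertools.groupby instead of A's running counter with a trailing flush; same values, idiomatic decomposition.

-- ===== PORT A =====
-- loop body of A: state (grupy, licznik)
def pvStepA (s : List Int × Int) (pole : Int) : List Int × Int :=
  if pole == 1 then (s.1, s.2 + 1)
  else if s.2 > 0 then (s.1 ++ [s.2], 0)
  else s

def znajdz_grupy (linia : List Int) : List Int :=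
  let r := linia.foldl pvStepA ([], 0)
  if r.2 > 0 then r.1 ++ [r.2] else r.1

-- ===== PORT B =====
-- transcription of groupby(linia, key=pole == 1): peel one maximal equal-key run at a
-- time; keep its length when the key is true.
def znajdz_grupy_alt : List Int → List Int
  | [] => []
  | x :: xs =>
    if x == 1 then
      ((xs.takeWhile (fun y => y == 1)).length + 1 : Int)
        :: znajdz_grupy_alt (xs.dropWhile (fun y => y == 1))
    else
      znajdz_grupy_alt (xs.dropWhile (fun y => !(y == 1)))
termination_by l => l.length
decreasing_by
  · exact Nat.lt_succ_of_le (List.length_dropWhile_le _ _)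
  · exact Nat.lt_succ_of_le (List.length_dropWhile_le _ _)

-- ===== PRECONDITION & SPEC =====
def Spec_znajdz_grupy (linia : List Int) (out : List Int) : Prop := out = znajdz_grupy_alt linia
instance (linia : List Int) (out : List Int) : Decidable (Spec_znajdz_grupy linia out) := by unfold Spec_znajdz_grupy; infer_instance

-- ===== CLAIM (what is proved, stated in full; the proofs are below) =====
def Claim_equal_znajdz_grupy : Prop := ∀ (linia : List Int), Dom_znajdz_grupy linia → Spec_znajdz_grupy linia (znajdz_grupy linia)

-- ===== LEMMAS AND PROOFS =====

-- dropping a leading run of non-ones does not change B's result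
lemma alt_dropWhile_ne (xs : List Int) :
    znajdz_grupy_alt (xs.dropWhile (fun y => !(y == 1))) = znajdz_grupy_alt xs := by
  induction xs with
  | nil => simp
  | cons y ys ih =>
    by_cases hy : y = 1
    · subst hy; simp [List.dropWhile]
    · simp only [List.dropWhile, show ((y == 1) : Bool) = false by simp [hy], Bool.not_false]
      conv_rhs => rw [znajdz_grupy_alt]
      simp [hy]

lemma alt_cons_ne (x : Int) (xs : List Int) (hx : x ≠ 1) :
    znajdz_grupy_alt (x :: xs) = znajdz_grupy_alt xs := by
  rw [znajdz_grupy_alt]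
  simp only [show ((x == 1) : Bool) = false by simp [hx]]
  exact alt_dropWhile_ne xs

lemma takeWhile_replicate_one (m : Nat) (x : Int) (xs : List Int) (hx : x ≠ 1) :
    (List.replicate m (1:Int) ++ x :: xs).takeWhile (fun y => y == 1) = List.replicate m (1:Int) := by
  induction m with
  | zero => simp [hx]
  | succ m ih => simp [List.replicate_succ, ih]

lemma dropWhile_replicate_one (m : Nat) (x : Int) (xs : List Int) (hx : x ≠ 1) :
    (List.replicate m (1:Int) ++ x :: xs).dropWhile (fun y => y == 1) = x :: xs := by
  induction m with
  | zero => simp [hx]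
  | succ m ih => simp [List.replicate_succ, ih]

-- B on a pure run of c ones
lemma alt_replicate (c : Nat) :
    znajdz_grupy_alt (List.replicate c (1:Int)) = if 0 < c then [(c : Int)] else [] := by
  cases c with
  | zero => simp [znajdz_grupy_alt]
  | succ m =>
    rw [List.replicate_succ, znajdz_grupy_alt]
    simp [znajdz_grupy_alt]

-- B on c ones followed by a non-one
lemma alt_replicate_cons (c : Nat) (hc : 0 < c) (x : Int) (xs : List Int) (hx : x ≠ 1) :
    znajdz_grupy_alt (List.replicate c (1:Int) ++ x :: xs) = (c : Int) :: znajdz_grupy_alt xs := by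
  obtain ⟨m, rfl⟩ := Nat.exists_eq_succ_of_ne_zero hc.ne'
  rw [List.replicate_succ, List.cons_append, znajdz_grupy_alt]
  simp only [beq_self_eq_true, if_true, takeWhile_replicate_one m x xs hx,
    dropWhile_replicate_one m x xs hx, List.length_replicate]
  rw [alt_cons_ne x xs hx]
  push_cast; ring_nf

-- loop invariant: A's fold with c ones pending equals B on (replicate c 1 ++ rest)
lemma foldA_inv (l : List Int) (g : List Int) (c : Nat) :
    (if (l.foldl pvStepA (g, (c:Int))).2 > 0
      then (l.foldl pvStepA (g, (c:Int))).1 ++ [(l.foldl pvStepA (g, (c:Int))).2]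
      else (l.foldl pvStepA (g, (c:Int))).1)
    = g ++ znajdz_grupy_alt (List.replicate c (1:Int) ++ l) := by
  induction l generalizing g c with
  | nil =>
    simp only [List.foldl_nil, List.append_nil, alt_replicate]
    by_cases hc : 0 < c
    · simp [hc]
    · simp [hc]
  | cons x xs ih =>
    by_cases hx : x = 1
    · subst hx
      have hstep : pvStepA (g, (c:Int)) 1 = (g, ((c+1 : Nat) : Int)) := by
        simp [pvStepA]
      rw [List.foldl_cons, hstep, ih g (c+1)]
      congr 1
      rw [show List.replicate c (1:Int) ++ 1 :: xs = List.replicate (c+1) (1:Int) ++ xs by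
        rw [List.replicate_add]; simp]
    · by_cases hc : 0 < c
      · have hstep : pvStepA (g, (c:Int)) x = (g ++ [(c:Int)], ((0:Nat):Int)) := by
          simp [pvStepA, hx]
          omega
        rw [List.foldl_cons, hstep, ih (g ++ [(c:Int)]) 0,
          alt_replicate_cons c hc x xs hx]
        simp
      · have hc0 : c = 0 := Nat.eq_zero_of_not_pos hc
        subst hc0
        have hstep : pvStepA (g, ((0:Nat):Int)) x = (g, ((0:Nat):Int)) := by
          simp [pvStepA, hx]
        rw [List.foldl_cons, hstep, ih g 0]
        simp [alt_cons_ne x xs hx]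

-- ===== VERDICT (by name: the statement is the Claim_ definition above) =====
theorem znajdz_grupy_spec : Claim_equal_znajdz_grupy := by
  intro linia _
  unfold Spec_znajdz_grupy znajdz_grupy
  have h := foldA_inv linia [] 0
  simpa using h
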